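-- pv_equiv track=rewrite | github.com/na2na8/capstone | capstone/prod_tagging.py | tagging_syllables
-- ===== SOURCE A (Python) =====
-- def tagging_syllables(product, words, words_tagging) :
--     product_length = len(product)
--     syllables = []
--     syl_tagging = []
--     # 음절단위로 product 쪼개기
--     for i in range(0, product_length) :
--         syllables.append(product[i])
--
--     for word_idx in range(0, len(words)) :
--         words_length = len(words[word_idx])
--         # 어절 태깅이 PRD_B일 때
--         if words_tagging[word_idx] == 'PRD_B' :
--             for j in range(0,words_length) :
--                  # PRD_B 단어의 첫 음절만 PRD_B
--                 if j == 0 :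
--                     syl_tagging.append('PRD_B')
--                 else :
--                     syl_tagging.append('PRD_I')
--         # 어절 태깅이 PRD_I일 때
--         elif words_tagging[word_idx] == 'PRD_I' :
--             for j in range(0, words_length) :
--                 syl_tagging.append('PRD_I')
--         # 어절 태깅이 PRDG_B일 때
--         elif words_tagging[word_idx] == 'PRDG_B' :
--             for j in range(0,words_length) :
--                 if j == 0 :
--                     syl_tagging.append('PRDG_B')
--                 else :
--                     syl_tagging.append('PRDG_I')
--         else :
--             for j in range(0, words_length) :
--                 syl_tagging.append('-')
--
--     return syllables, syl_tagging
-- ===== SOURCE B (Python) =====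
-- def tagging_syllables(product, words, words_tagging):
--     # Single flat state-machine loop: one append per syllable, driven by the state
--     # (remaining, inside) instead of nested per-word loops.
--     TABLE = {'PRD_B': ('PRD_B', 'PRD_I'),
--              'PRD_I': ('PRD_I', 'PRD_I'),
--              'PRDG_B': ('PRDG_B', 'PRDG_I')}
--     syl_tagging = []
--     queue = list(zip(words, words_tagging))[::-1]   # pop() from the end = consume in order
--     remaining, inside = 0, '-'
--     while remaining or queue:
--         if remaining:
--             syl_tagging.append(inside)
--             remaining -= 1
--         else:
--             word, tag = queue.pop()
--             begin, inside = TABLE.get(tag, ('-', '-'))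
--             if word:
--                 syl_tagging.append(begin)
--                 remaining = len(word) - 1
--     return list(product), syl_tagging
-- ===== Notes on version B (the rewrite author's own statement) =====
-- stated objective: alternative
-- what changed: Replaces A's four branch-specific nested per-word loops with a single flat state-machine loop over a work queue: the state (remaining, inside) emits exactly one tag per iteration, so there is no per-word inner loop at all; syllables come from list(product).
import Mathlib
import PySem

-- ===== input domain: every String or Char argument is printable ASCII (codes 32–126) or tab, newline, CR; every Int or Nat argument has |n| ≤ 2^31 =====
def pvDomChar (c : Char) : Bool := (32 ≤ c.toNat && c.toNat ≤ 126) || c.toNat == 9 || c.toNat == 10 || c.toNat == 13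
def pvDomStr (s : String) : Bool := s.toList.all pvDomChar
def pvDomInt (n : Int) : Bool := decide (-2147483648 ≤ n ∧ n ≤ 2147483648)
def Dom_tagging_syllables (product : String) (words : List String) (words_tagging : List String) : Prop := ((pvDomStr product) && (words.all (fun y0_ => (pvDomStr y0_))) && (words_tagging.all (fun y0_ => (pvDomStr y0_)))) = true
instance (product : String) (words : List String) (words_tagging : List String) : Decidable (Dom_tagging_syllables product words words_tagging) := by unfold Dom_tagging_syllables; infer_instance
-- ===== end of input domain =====

-- B replaces A's four nested per-word loops by one flat state-machine loop (state = remaining inside-count and inside tag) over a work queue; objective: alternative. Equal return values on Pre_.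


-- ===== PORT A =====
def tagging_syllables (product : String) (words : List String) (words_tagging : List String) : List String × List String :=
  let product_length := PySem.Str.len product
  let syllables := (PySem.List.pyRange 0 product_length).foldl
    (fun acc i => acc ++ [String.ofList [(PySem.Str.pyGet? product i).getD ' ']]) []
  let syl_tagging := (PySem.List.pyRange 0 (PySem.List.len words)).foldl
    (fun acc word_idx =>
      let words_length := PySem.Str.len (PySem.List.pyGetD words word_idx "")
      let tag := PySem.List.pyGetD words_tagging word_idx ""
      if tag == "PRD_B" then
        (PySem.List.pyRange 0 words_length).foldl
          (fun a j => a ++ [if j == 0 then "PRD_B" else "PRD_I"]) acc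
      else if tag == "PRD_I" then
        (PySem.List.pyRange 0 words_length).foldl (fun a _ => a ++ ["PRD_I"]) acc
      else if tag == "PRDG_B" then
        (PySem.List.pyRange 0 words_length).foldl
          (fun a j => a ++ [if j == 0 then "PRDG_B" else "PRDG_I"]) acc
      else
        (PySem.List.pyRange 0 words_length).foldl (fun a _ => a ++ ["-"]) acc) []
  (syllables, syl_tagging)

-- ===== PORT B =====
-- the TABLE of Source B: word-tag ↦ (begin tag, inside tag)
def pvTagTable : PySem.Dict String (String × String) :=
  ((PySem.Dict.empty.insert "PRD_B" ("PRD_B", "PRD_I")).insert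
      "PRD_I" ("PRD_I", "PRD_I")).insert "PRDG_B" ("PRDG_B", "PRDG_I")

-- Source B's while loop: state (remaining, inside) plus the work queue; one tag emitted per step.
-- Python builds queue = list(zip(...))[::-1] and pops from the END; popping the reversed copy
-- from the end consumes the original zip front-to-back, modelled here as head consumption.
def tagLoop : Nat → String → List (String × String) → List String
  | r + 1, inside, queue => inside :: tagLoop r inside queue
  | 0, _, [] => []
  | 0, _, (word, tag) :: rest =>
      let bi := PySem.Dict.getD pvTagTable tag ("-", "-")
      if word.toList ≠ [] then bi.1 :: tagLoop (word.length - 1) bi.2 rest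
      else tagLoop 0 bi.2 rest
termination_by r _ queue => (queue.length, r)
decreasing_by
  · exact Prod.Lex.right _ (Nat.lt_succ_self r)
  · exact Prod.Lex.left _ _ (Nat.lt_succ_self rest.length)
  · exact Prod.Lex.left _ _ (Nat.lt_succ_self rest.length)

def tagging_syllables_alt (product : String) (words : List String) (words_tagging : List String) : List String × List String :=
  (product.toList.map (fun c => String.ofList [c]), tagLoop 0 "-" (words.zip words_tagging))

-- ===== PRECONDITION & SPEC =====
-- A indexes words_tagging by every index of words: it raises IndexError (returns nothing) when words_tagging is shorter, so exactly those inputs are excluded.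
def Pre_tagging_syllables (product : String) (words : List String) (words_tagging : List String) : Prop :=
  words.length ≤ words_tagging.length
instance (product : String) (words : List String) (words_tagging : List String) : Decidable (Pre_tagging_syllables product words words_tagging) := by unfold Pre_tagging_syllables; infer_instance

def pvWitness_tagging_syllables : String × List String × List String :=
  ("abc de", ["abc", "de"], ["PRD_B", "PRD_I"])

def Spec_tagging_syllables (product : String) (words : List String) (words_tagging : List String) (out : List String × List String) : Prop := out = tagging_syllables_alt product words words_tagging
instance (product : String) (words : List String) (words_tagging : List String) (out : List String × List String) : Decidable (Spec_tagging_syllables product words words_tagging out) := by unfold Spec_tagging_syllables; infer_instance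

-- ===== CLAIM (what is proved, stated in full; the proofs are below) =====
def Claim_equal_tagging_syllables : Prop := ∀ (product : String) (words : List String) (words_tagging : List String), Dom_tagging_syllables product words words_tagging → Pre_tagging_syllables product words words_tagging → Spec_tagging_syllables product words words_tagging (tagging_syllables product words words_tagging)

-- ===== LEMMAS AND PROOFS =====

-- per-word tag lists produced by A's branches and by one queue step of B (proof-side helpers)
def pvWordTagsA (w t : String) : List String :=
  if t == "PRD_B" then
    (PySem.List.pyRange 0 (PySem.Str.len w)).map (fun j => if j == 0 then "PRD_B" else "PRD_I")
  else if t == "PRD_I" then (PySem.List.pyRange 0 (PySem.Str.len w)).map (fun _ => "PRD_I")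
  else if t == "PRDG_B" then
    (PySem.List.pyRange 0 (PySem.Str.len w)).map (fun j => if j == 0 then "PRDG_B" else "PRDG_I")
  else (PySem.List.pyRange 0 (PySem.Str.len w)).map (fun _ => "-")

def pvWordTagsB (w t : String) : List String :=
  if w.toList ≠ [] then
    let bi := PySem.Dict.getD pvTagTable t ("-", "-")
    bi.1 :: List.replicate (w.length - 1) bi.2
  else []

lemma pv_syll_eq (p : String) :
    (PySem.List.pyRange 0 (PySem.Str.len p)).foldl
      (fun acc i => acc ++ [String.ofList [(PySem.Str.pyGet? p i).getD ' ']]) []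
    = p.toList.map (fun c => String.ofList [c]) := by
  have hb : ∀ (acc : List String), ∀ i ∈ PySem.List.pyRange 0 (PySem.Str.len p),
      acc ++ [String.ofList [(PySem.Str.pyGet? p i).getD ' ']]
      = acc ++ [String.ofList [PySem.List.pyGetD p.toList i ' ']] := by
    intro acc i _
    simp [PySem.List.pyGetD, PySem.Str.pyGet?, PySem.Chars.pyGet?]
  rw [PySem.List.foldl_congr_mem _ _ _ _ hb]
  rw [show PySem.Str.len p = PySem.List.len p.toList by simp]
  rw [PySem.List.foldl_pyRange_pyGetD p.toList ' '
    (fun acc c => acc ++ [String.ofList [c]]) [] (a := 0) le_rfl]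
  simp
  induction p.toList with
  | nil => rfl
  | cons c l ih => simp [ih]

lemma pv_table_default (t : String) (h1 : t ≠ "PRD_B") (h2 : t ≠ "PRD_I") (h3 : t ≠ "PRDG_B") :
    pvTagTable.getD t ("-", "-") = ("-", "-") := by
  simp [pvTagTable, PySem.Dict.getD, PySem.Dict.get?, PySem.Dict.insert, PySem.Dict.empty,
    List.find?, show ("PRD_B" == t) = false by simp [Ne.symm h1],
    show ("PRD_I" == t) = false by simp [Ne.symm h2],
    show ("PRDG_B" == t) = false by simp [Ne.symm h3]]

lemma pv_map_const (n : Nat) (c : String) :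
    (PySem.List.pyRange 0 (n : Int)).map (fun _ => c) = List.replicate n c := by
  simp [PySem.List.pyRange_zero_natCast, List.map_map, Function.comp_def, List.map_const']

lemma pv_map_branch (L : Nat) (h : 0 < L) (b i : String) :
    (PySem.List.pyRange 0 (L : Int)).map (fun j => if j == 0 then b else i)
    = b :: List.replicate (L - 1) i := by
  obtain ⟨m, rfl⟩ : ∃ m, L = m + 1 := ⟨L - 1, by omega⟩
  have hz : ∀ x : ℕ, ((x : Int) + 1 = 0) = False := by intro x; simp; omega
  rw [PySem.List.pyRange_zero_natCast, List.range_succ_eq_map]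
  simp [List.map_map, Function.comp_def, hz, List.map_const']

lemma pv_wordTags_eq (w t : String) : pvWordTagsA w t = pvWordTagsB w t := by
  by_cases hw : w.toList = []
  · have h0 : PySem.Str.len w = ((0 : Nat) : Int) := by simp [show w.length = 0 by simpa using congrArg List.length hw]
    simp [pvWordTagsA, pvWordTagsB, hw]
  · have hL : 0 < w.length := by
      have h := List.length_pos_iff.mpr hw
      simpa using h
    have hlen : PySem.Str.len w = (w.length : Int) := by simp
    obtain ⟨m, hm⟩ : ∃ m, w.length = m + 1 := ⟨w.length - 1, by omega⟩
    by_cases h1 : t = "PRD_B"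
    · subst h1
      rw [show pvWordTagsA w "PRD_B" = (PySem.List.pyRange 0 (PySem.Str.len w)).map
          (fun j => if j == 0 then "PRD_B" else "PRD_I") from by simp [pvWordTagsA]]
      rw [hlen, pv_map_branch _ hL]
      simp [pvWordTagsB, pvTagTable, PySem.Dict.getD, PySem.Dict.get?, PySem.Dict.insert,
        PySem.Dict.empty, hw]
    · by_cases h2 : t = "PRD_I"
      · subst h2
        rw [show pvWordTagsA w "PRD_I" = (PySem.List.pyRange 0 (PySem.Str.len w)).map
            (fun _ => "PRD_I") from by simp [pvWordTagsA]]
        rw [hlen, pv_map_const]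
        simp [pvWordTagsB, pvTagTable, PySem.Dict.getD, PySem.Dict.get?, PySem.Dict.insert,
          PySem.Dict.empty, hw, hm, List.replicate_succ]
      · by_cases h3 : t = "PRDG_B"
        · subst h3
          rw [show pvWordTagsA w "PRDG_B" = (PySem.List.pyRange 0 (PySem.Str.len w)).map
              (fun j => if j == 0 then "PRDG_B" else "PRDG_I") from by simp [pvWordTagsA]]
          rw [hlen, pv_map_branch _ hL]
          simp [pvWordTagsB, pvTagTable, PySem.Dict.getD, PySem.Dict.get?, PySem.Dict.insert,
            PySem.Dict.empty, hw]
        · rw [show pvWordTagsA w t = (PySem.List.pyRange 0 (PySem.Str.len w)).map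
              (fun _ => "-") from by simp [pvWordTagsA, h1, h2, h3]]
          rw [hlen, pv_map_const]
          simp [pvWordTagsB, hw, pv_table_default t h1 h2 h3, hm, List.replicate_succ]

lemma pv_range_zip (ws ts : List String) (h : ws.length ≤ ts.length)
    (g : String → String → List String) :
    (List.range ws.length).flatMap (fun k => g (ws.getD k "") (ts.getD k ""))
    = (ws.zip ts).flatMap (fun p => g p.1 p.2) := by
  induction ws generalizing ts with
  | nil => simp
  | cons w ws ih =>
    cases ts with
    | nil => simp at h
    | cons t ts =>
      simp only [List.length_cons, List.range_succ_eq_map, List.flatMap_cons, List.flatMap_map]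
      simp only [List.getD_cons_zero, List.getD_cons_succ, List.zip_cons_cons, List.flatMap_cons]
      congr 1
      exact ih ts (by simpa using h)

lemma pv_tagsA_eq (ws ts : List String) (h : ws.length ≤ ts.length) :
    (PySem.List.pyRange 0 (PySem.List.len ws)).foldl
      (fun acc word_idx =>
        let words_length := PySem.Str.len (PySem.List.pyGetD ws word_idx "")
        let tag := PySem.List.pyGetD ts word_idx ""
        if tag == "PRD_B" then
          (PySem.List.pyRange 0 words_length).foldl
            (fun a j => a ++ [if j == 0 then "PRD_B" else "PRD_I"]) acc
        else if tag == "PRD_I" then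
          (PySem.List.pyRange 0 words_length).foldl (fun a _ => a ++ ["PRD_I"]) acc
        else if tag == "PRDG_B" then
          (PySem.List.pyRange 0 words_length).foldl
            (fun a j => a ++ [if j == 0 then "PRDG_B" else "PRDG_I"]) acc
        else
          (PySem.List.pyRange 0 words_length).foldl (fun a _ => a ++ ["-"]) acc) []
    = (ws.zip ts).flatMap (fun p => pvWordTagsA p.1 p.2) := by
  have hbody : ∀ (acc : List String), ∀ idx ∈ PySem.List.pyRange 0 (PySem.List.len ws),
      (let words_length := PySem.Str.len (PySem.List.pyGetD ws idx "")
       let tag := PySem.List.pyGetD ts idx ""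
       if tag == "PRD_B" then
         (PySem.List.pyRange 0 words_length).foldl
           (fun a j => a ++ [if j == 0 then "PRD_B" else "PRD_I"]) acc
       else if tag == "PRD_I" then
         (PySem.List.pyRange 0 words_length).foldl (fun a _ => a ++ ["PRD_I"]) acc
       else if tag == "PRDG_B" then
         (PySem.List.pyRange 0 words_length).foldl
           (fun a j => a ++ [if j == 0 then "PRDG_B" else "PRDG_I"]) acc
       else
         (PySem.List.pyRange 0 words_length).foldl (fun a _ => a ++ ["-"]) acc)
      = acc ++ pvWordTagsA (PySem.List.pyGetD ws idx "") (PySem.List.pyGetD ts idx "") := by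
    intro acc idx _
    simp only [pvWordTagsA, PySem.List.foldl_append_singleton_eq_map]
    split_ifs <;> rfl
  rw [PySem.List.foldl_congr_mem _ _ _ _ hbody]
  rw [PySem.List.foldl_append_eq_flatMap]
  rw [show PySem.List.len ws = (ws.length : Int) by simp]
  rw [PySem.List.pyRange_zero_natCast, List.flatMap_map]
  simp only [PySem.List.pyGetD_natCast]
  simpa using pv_range_zip ws ts h _

-- unrolling the state machine: r pending inside-tags come out first
lemma pv_tagLoop_repl (r : Nat) (ins : String) (q : List (String × String)) :
    tagLoop r ins q = List.replicate r ins ++ tagLoop 0 ins q := by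
  induction r with
  | zero => rfl
  | succ n ih => simp [tagLoop, ih, List.replicate_succ]

-- one queue step of the state machine emits exactly pvWordTagsB of that word
lemma pv_tagsB_eq (q : List (String × String)) (ins : String) :
    tagLoop 0 ins q = q.flatMap (fun p => pvWordTagsB p.1 p.2) := by
  induction q generalizing ins with
  | nil => simp [tagLoop]
  | cons p rest ih =>
    obtain ⟨w, t⟩ := p
    rw [tagLoop.eq_3, List.flatMap_cons]
    by_cases hw : w.toList = []
    · rw [if_neg (by simp [hw]), ih]
      simp [pvWordTagsB, hw]
    · rw [if_pos hw, pv_tagLoop_repl, ih]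
      simp [pvWordTagsB, hw]

-- ===== VERDICT (by name: the statement is the Claim_ definition above) =====
theorem tagging_syllables_spec : Claim_equal_tagging_syllables := by
  intro product words words_tagging _ hpre
  unfold Spec_tagging_syllables tagging_syllables tagging_syllables_alt
  refine Prod.ext ?_ ?_
  · simpa using pv_syll_eq product
  · simp only []
    rw [pv_tagsA_eq words words_tagging hpre, pv_tagsB_eq]
    simp only [pv_wordTags_eq]
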